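-- pv_equiv track=rewrite | github.com/ValenzuelaRa/BajaService_Bot | analizar_preguntas.py | es_pregunta
-- ===== SOURCE A (Python) =====
-- def es_pregunta(input_usuario):
--     """
--     Determina si el parametro ingresado es una pregunta y clasifica el tipo de pregunta.
--     1: si es una pregunta con pronombres interrogativos.
--     2: si es una pregunta con adjetivos interrogativos.
--     3: si es una pregunta con adverbios interrogativos.
--     4: si es una pregunta con partículas interrogativas.
--     5: si es una pregunta específica con "por qué".
--     """
--
--     # Listas de palabras interrogativas
--     pronombres_interrogativos = ['quien', 'que', 'cual', 'cuales', 'cuanto', 'cuantos', 'cuanta', 'cuantas', 'cuando', 'donde', 'por que', 'como']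
--
--     adjetivos_interrogativos = ['que', 'cual', 'cuales', 'cuanto', 'cuantos', 'cuanta', 'cuántas']
--
--     adverbios_interrogativos = ['cuando', 'por que', 'como']
--
--     particulas_interrogativas = ["no", "acaso", "verdad", "a que", "o no", "no es cierto", "no es verdad", "no es asi"]
--
--     # Convierte en minúsculas el prompt
--     input_usuario = input_usuario.lower()
--
--     # Divide el texto ingresado por el usuario en palabras y se asigna a la variable palabras
--     palabras = input_usuario.split()
--
--     # Banderas para el tipo de pregunta
--     bandera = 0
--     palabra_interrogativa = None  # Aqui se guargara la palabra para despues se muestre en la salida de la solicitud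
--     tipo_pregunta = None  # Agregamos una variable para el tipo de pregunta
--
--     # Verificar las palabras que hacen que el texto sea pregunta
--     for palabra in palabras:
--         if palabra in pronombres_interrogativos:
--             bandera = 1  # Pregunta pronombres interrogativa
--             palabra_interrogativa = palabra  # la palabra que toma el for se almacena en la palabra interrogativa
--             tipo_pregunta = "pronombres_interrogativos"
--             return bandera, palabra_interrogativa, tipo_pregunta  # Regresamos la tipo de pregunta, la palabra, y a que interrogativa se encuentra la palabra
--
--         elif palabra in adjetivos_interrogativos:
--             bandera = 2  # Pregunta Adjetivos Interrogativos
--             palabra_interrogativa = palabra  # la palabra que toma el for se almacena en la palabra interrogativa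
--             tipo_pregunta = "adjetivos_interrogativos"
--             return bandera, palabra_interrogativa, tipo_pregunta  # Regresamos la tipo de pregunta, la palabra, y a que interrogativa se encuentra la palabra
--
--         elif palabra in adverbios_interrogativos:
--             bandera = 3  # Pregunta Adverbios Interrogativos
--             palabra_interrogativa = palabra  # la palabra que toma el for se almacena en la palabra interrogativa
--             tipo_pregunta = "adverbios_interrogativos"
--             return bandera, palabra_interrogativa, tipo_pregunta  # Regresamos la tipo de pregunta, la palabra, y a que interrogativa se encuentra la palabra
--
--         elif palabra in particulas_interrogativas:
--             bandera = 4  # Pregunta Particulas interrogativas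
--             palabra_interrogativa = palabra  # la palabra que toma el for se almacena en la palabra interrogativa
--             tipo_pregunta = "particulas_interrogativas"
--             return bandera, palabra_interrogativa, tipo_pregunta  # Regresamos la tipo de pregunta, la palabra, y a que interrogativa se encuentra la palabra
--
--         elif "por" in palabra and "que" in palabra and palabra[palabra.index("por") + 1] == "que":
--             bandera = 5
--             palabra_interrogativa = palabra
--             tipo_pregunta = "por_que"
--             return bandera, palabra_interrogativa, tipo_pregunta
--
--     return bandera, palabra_interrogativa, tipo_pregunta  # No es una pregunta
-- ===== SOURCE B (Python) =====
-- # One classification table built once (reverse priority so earlier-checked classes win),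
-- # then a single lookup per word.
--
-- _CLASSES = [
--     ("particulas_interrogativas", 4,
--      ["no", "acaso", "verdad", "a que", "o no", "no es cierto", "no es verdad", "no es asi"]),
--     ("adverbios_interrogativos", 3, ['cuando', 'por que', 'como']),
--     ("adjetivos_interrogativos", 2,
--      ['que', 'cual', 'cuales', 'cuanto', 'cuantos', 'cuanta', 'cuántas']),
--     ("pronombres_interrogativos", 1,
--      ['quien', 'que', 'cual', 'cuales', 'cuanto', 'cuantos', 'cuanta', 'cuantas',
--       'cuando', 'donde', 'por que', 'como']),
-- ]
--
-- def _build():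
--     table = {}
--     for tipo, bandera, palabras in _CLASSES:
--         for palabra in palabras:
--             table[palabra] = (bandera, tipo)
--     return table
--
-- _CLASS = _build()
--
-- def es_pregunta(input_usuario):
--     for palabra in input_usuario.lower().split():
--         hit = _CLASS.get(palabra)
--         if hit is not None:
--             bandera, tipo = hit
--             return bandera, palabra, tipo
--     return 0, None, None
-- ===== Notes on version B (the rewrite author's own statement) =====
-- stated objective: simpler
-- what changed: Replaces the four-list membership if/elif chain plus the dead fifth substring branch with a single word->(bandera,tipo) table built once in reverse priority order and one lookup per word.
import Mathlib
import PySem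

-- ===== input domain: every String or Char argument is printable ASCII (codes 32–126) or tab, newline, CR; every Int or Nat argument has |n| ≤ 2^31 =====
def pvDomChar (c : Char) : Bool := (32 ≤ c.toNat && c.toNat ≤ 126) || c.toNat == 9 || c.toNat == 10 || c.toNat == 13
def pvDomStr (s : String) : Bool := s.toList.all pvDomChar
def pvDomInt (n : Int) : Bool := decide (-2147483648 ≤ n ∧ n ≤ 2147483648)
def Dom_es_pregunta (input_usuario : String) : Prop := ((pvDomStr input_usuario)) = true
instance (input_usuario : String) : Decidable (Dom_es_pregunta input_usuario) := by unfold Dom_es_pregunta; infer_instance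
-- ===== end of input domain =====

-- B replaces A's four-list if/elif chain (and its dead fifth substring branch) by one
-- word -> (bandera, tipo) table built in reverse priority order, looked up once per word (simpler).

-- ===== PORT A =====
def pvPron : List String :=
  ["quien", "que", "cual", "cuales", "cuanto", "cuantos", "cuanta", "cuantas", "cuando", "donde", "por que", "como"]
def pvAdj : List String :=
  ["que", "cual", "cuales", "cuanto", "cuantos", "cuanta", "cuántas"]
def pvAdv : List String :=
  ["cuando", "por que", "como"]
def pvPart : List String :=
  ["no", "acaso", "verdad", "a que", "o no", "no es cierto", "no es verdad", "no es asi"]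

def esPreguntaLoop : List String → Int × Option String × Option String
  | [] => (0, none, none)
  | palabra :: rest =>
    if palabra ∈ pvPron then (1, some palabra, some "pronombres_interrogativos")
    else if palabra ∈ pvAdj then (2, some palabra, some "adjetivos_interrogativos")
    else if palabra ∈ pvAdv then (3, some palabra, some "adverbios_interrogativos")
    else if palabra ∈ pvPart then (4, some palabra, some "particulas_interrogativas")
    else if PySem.Str.isIn "por" palabra && PySem.Str.isIn "que" palabra &&
        -- palabra[palabra.index("por") + 1] == "que": a 1-char string compared with "que"
        (match PySem.Str.pyGet? palabra (PySem.Str.find palabra "por" + 1) with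
         | some c => [c] == "que".toList
         | none => false)  -- none = IndexError; unreachable: "por" in palabra forces index+1 < len(palabra)
      then (5, some palabra, some "por_que")
    else esPreguntaLoop rest

def es_pregunta (input_usuario : String) : Int × Option String × Option String :=
  esPreguntaLoop (PySem.Str.split₀ (PySem.Str.lower input_usuario))

-- ===== PORT B =====
def pvClasses : List (String × Int × List String) :=
  [("particulas_interrogativas", 4, pvPart),
   ("adverbios_interrogativos", 3, pvAdv),
   ("adjetivos_interrogativos", 2, pvAdj),
   ("pronombres_interrogativos", 1, pvPron)]

def pvClassTable : PySem.Dict String (Int × String) :=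
  pvClasses.foldl
    (fun table c =>
      c.2.2.foldl (fun table palabra => table.insert palabra (c.2.1, c.1)) table)
    PySem.Dict.empty

def esPreguntaAltLoop : List String → Int × Option String × Option String
  | [] => (0, none, none)
  | palabra :: rest =>
    match pvClassTable.get? palabra with
    | some hit => (hit.1, some palabra, some hit.2)
    | none => esPreguntaAltLoop rest

def es_pregunta_alt (input_usuario : String) : Int × Option String × Option String :=
  esPreguntaAltLoop (PySem.Str.split₀ (PySem.Str.lower input_usuario))

-- ===== PRECONDITION & SPEC =====
def Spec_es_pregunta (input_usuario : String) (out : Int × Option String × Option String) : Prop := out = es_pregunta_alt input_usuario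
instance (input_usuario : String) (out : Int × Option String × Option String) : Decidable (Spec_es_pregunta input_usuario out) := by unfold Spec_es_pregunta; infer_instance

-- ===== CLAIM (what is proved, stated in full; the proofs are below) =====
def Claim_equal_es_pregunta : Prop := ∀ (input_usuario : String), Dom_es_pregunta input_usuario → Spec_es_pregunta input_usuario (es_pregunta input_usuario)

-- ===== LEMMAS AND PROOFS =====

-- Branch 5's comparison is always false: palabra[i] is one character, never the 3-char "que".
theorem pvBranch5_false (palabra : String) :
    (match PySem.Str.pyGet? palabra (PySem.Str.find palabra "por" + 1) with
     | some c => [c] == "que".toList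
     | none => false) = false := by
  cases h : PySem.Str.pyGet? palabra (PySem.Str.find palabra "por" + 1) with
  | none => rfl
  | some c => simp

theorem pvLoop_eq (ws : List String) : esPreguntaLoop ws = esPreguntaAltLoop ws := by
  induction ws with
  | nil => rfl
  | cons w rest ih =>
    rw [esPreguntaLoop, esPreguntaAltLoop]
    by_cases h1 : w ∈ pvPron
    · simp only [pvPron, List.mem_cons, List.not_mem_nil, or_false] at h1
      rcases h1 with h | h | h | h | h | h | h | h | h | h | h | h <;> subst h <;> rfl
    · by_cases h2 : w ∈ pvAdj
      · simp only [if_neg h1, if_pos h2]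
        simp only [pvAdj, List.mem_cons, List.not_mem_nil, or_false] at h2
        simp only [pvPron, List.mem_cons, List.not_mem_nil, or_false] at h1
        push Not at h1
        rcases h2 with h | h | h | h | h | h | h <;> subst h <;> first | rfl | simp_all
      · by_cases h3 : w ∈ pvAdv
        · exfalso
          apply h1
          simp only [pvAdv, List.mem_cons, List.not_mem_nil, or_false] at h3
          rcases h3 with h | h | h <;> subst h <;> decide
        · by_cases h4 : w ∈ pvPart
          · simp only [if_neg h1, if_neg h2, if_neg h3, if_pos h4]
            simp only [pvPart, List.mem_cons, List.not_mem_nil, or_false] at h4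
            rcases h4 with h | h | h | h | h | h | h | h <;> subst h <;> rfl
          · simp only [if_neg h1, if_neg h2, if_neg h3, if_neg h4, pvBranch5_false,
              Bool.and_false, if_neg (by simp : ¬ (false = true))]
            have hget : pvClassTable.get? w = none := by
              simp only [pvPron, List.mem_cons, List.not_mem_nil, or_false] at h1
              simp only [pvAdj, List.mem_cons, List.not_mem_nil, or_false] at h2
              simp only [pvAdv, List.mem_cons, List.not_mem_nil, or_false] at h3
              simp only [pvPart, List.mem_cons, List.not_mem_nil, or_false] at h4
              push Not at h1 h2 h3 h4
              obtain ⟨n1, n2, n3, n4, n5, n6, n7, n8, n9, n10, n11, n12⟩ := h1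
              obtain ⟨m1, m2, m3, m4, m5, m6, m7⟩ := h2
              obtain ⟨p1, p2, p3, p4, p5, p6, p7, p8⟩ := h4
              have e : ∀ (a : String), ¬ w = a → (a == w) = false :=
                fun a h => beq_eq_false_iff_ne.mpr (Ne.symm h)
              rw [show pvClassTable = PySem.Dict.mk
                [("no", 4, "particulas_interrogativas"), ("acaso", 4, "particulas_interrogativas"),
                 ("verdad", 4, "particulas_interrogativas"), ("a que", 4, "particulas_interrogativas"),
                 ("o no", 4, "particulas_interrogativas"), ("no es cierto", 4, "particulas_interrogativas"),
                 ("no es verdad", 4, "particulas_interrogativas"), ("no es asi", 4, "particulas_interrogativas"),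
                 ("cuando", 1, "pronombres_interrogativos"), ("por que", 1, "pronombres_interrogativos"),
                 ("como", 1, "pronombres_interrogativos"), ("que", 1, "pronombres_interrogativos"),
                 ("cual", 1, "pronombres_interrogativos"), ("cuales", 1, "pronombres_interrogativos"),
                 ("cuanto", 1, "pronombres_interrogativos"), ("cuantos", 1, "pronombres_interrogativos"),
                 ("cuanta", 1, "pronombres_interrogativos"), ("cuántas", 2, "adjetivos_interrogativos"),
                 ("quien", 1, "pronombres_interrogativos"), ("cuantas", 1, "pronombres_interrogativos"),
                 ("donde", 1, "pronombres_interrogativos")] from by decide]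
              simp [PySem.Dict.get?, List.find?,
                e _ p1, e _ p2, e _ p3, e _ p4, e _ p5, e _ p6, e _ p7, e _ p8,
                e _ n9, e _ n11, e _ n12, e _ m1, e _ m2, e _ m3, e _ m4, e _ m5, e _ m6, e _ m7,
                e _ n1, e _ n8, e _ n10]
            rw [hget, ih]

-- ===== VERDICT (by name: the statement is the Claim_ definition above) =====
theorem es_pregunta_spec : Claim_equal_es_pregunta := by
  intro s _
  unfold Spec_es_pregunta es_pregunta es_pregunta_alt
  exact pvLoop_eq _
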